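-- pv_equiv track=rewrite | github.com/saad-inamdar7890/Traffic-Light-Automation | f2/rl_predictive_algorithm.py | analyze_traffic_pressure
-- ===== SOURCE A (Python) =====
-- from typing import Dict, List, Tuple
--
-- def analyze_traffic_pressure(lane_vehicles: Dict[str, int]) -> Dict[str, str]:
--     """Analyze current traffic pressure in each lane."""
--
--     lane_mapping = {'north': 0, 'east': 1, 'south': 2, 'west': 3}
--     pressure_levels = {}
--
--     for lane, vehicle_count in lane_vehicles.items():
--         if vehicle_count >= 20:
--             pressure_levels[lane] = 'CRITICAL'
--         elif vehicle_count >= 15: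
--             pressure_levels[lane] = 'HIGH'
--         elif vehicle_count >= 8:
--             pressure_levels[lane] = 'MODERATE'
--         elif vehicle_count >= 4:
--             pressure_levels[lane] = 'LOW'
--         else:
--             pressure_levels[lane] = 'MINIMAL'
--
--     return pressure_levels
-- ===== SOURCE B (Python) =====
-- def analyze_traffic_pressure(lane_vehicles):
--     """Analyze current traffic pressure in each lane."""
--     pressure_levels = {lane: 'MINIMAL' for lane in lane_vehicles}
--     for threshold, label in ((4, 'LOW'), (8, 'MODERATE'), (15, 'HIGH'), (20, 'CRITICAL')):
--         for lane, count in lane_vehicles.items():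
--             if count >= threshold:
--                 pressure_levels[lane] = label
--     return pressure_levels
-- ===== Notes on version B (the rewrite author's own statement) =====
-- stated objective: alternative
-- what changed: Replaces the per-lane if-elif cascade by staged overwriting passes: every lane starts at MINIMAL, then one sweep per ascending threshold upgrades the lanes that meet it, so the decision logic becomes repeated monotone overwrites instead of branching; the unused lane_mapping is dropped.
import Mathlib
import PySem

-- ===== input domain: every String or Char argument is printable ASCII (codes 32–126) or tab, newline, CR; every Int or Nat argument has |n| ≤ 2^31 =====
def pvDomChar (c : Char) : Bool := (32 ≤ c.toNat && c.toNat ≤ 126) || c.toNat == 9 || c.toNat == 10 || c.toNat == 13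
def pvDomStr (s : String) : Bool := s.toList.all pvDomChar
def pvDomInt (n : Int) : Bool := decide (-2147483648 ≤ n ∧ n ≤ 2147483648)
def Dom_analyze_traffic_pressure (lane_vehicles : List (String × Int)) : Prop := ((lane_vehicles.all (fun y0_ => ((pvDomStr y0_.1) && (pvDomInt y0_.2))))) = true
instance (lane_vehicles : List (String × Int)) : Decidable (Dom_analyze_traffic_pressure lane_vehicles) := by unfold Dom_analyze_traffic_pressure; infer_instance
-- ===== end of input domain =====

-- B replaces the per-lane if-elif cascade by staged overwriting passes (every lane
-- starts at MINIMAL, one sweep per ascending threshold upgrades the lanes that meet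
-- it); alternative decomposition, same cost; the unused lane_mapping is dropped.

-- ===== PORT A =====
def analyze_traffic_pressure (lane_vehicles : List (String × Int)) : List (String × String) :=
  -- lane_mapping is built and never used; kept out of the state
  let pressure_levels : PySem.Dict String String := PySem.Dict.empty
  let pressure_levels := lane_vehicles.foldl (fun pressure_levels p =>
    let lane := p.1
    let vehicle_count := p.2
    if vehicle_count ≥ 20 then pressure_levels.insert lane "CRITICAL"
    else if vehicle_count ≥ 15 then pressure_levels.insert lane "HIGH"
    else if vehicle_count ≥ 8 then pressure_levels.insert lane "MODERATE"
    else if vehicle_count ≥ 4 then pressure_levels.insert lane "LOW"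
    else pressure_levels.insert lane "MINIMAL") pressure_levels
  pressure_levels.items

-- ===== PORT B =====
def pvStages : List (Int × String) := [(4, "LOW"), (8, "MODERATE"), (15, "HIGH"), (20, "CRITICAL")]

def analyze_traffic_pressure_alt (lane_vehicles : List (String × Int)) : List (String × String) :=
  -- {lane: 'MINIMAL' for lane in lane_vehicles}
  let pressure_levels : PySem.Dict String String :=
    lane_vehicles.foldl (fun d p => d.insert p.1 "MINIMAL") PySem.Dict.empty
  -- staged upgrade passes, one per (threshold, label)
  let pressure_levels := pvStages.foldl (fun d tl =>
    lane_vehicles.foldl (fun d p =>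
      if p.2 ≥ tl.1 then d.insert p.1 tl.2 else d) d) pressure_levels
  pressure_levels.items

-- ===== PRECONDITION & SPEC =====
-- Pre_ excludes association lists with duplicate lane keys: A's Python argument is a
-- dict, which cannot contain duplicate keys, so such lists encode no Python input.
def Pre_analyze_traffic_pressure (lane_vehicles : List (String × Int)) : Prop :=
  (lane_vehicles.map (·.1)).Nodup
instance (lane_vehicles : List (String × Int)) : Decidable (Pre_analyze_traffic_pressure lane_vehicles) := by unfold Pre_analyze_traffic_pressure; infer_instance

def pvWitness_analyze_traffic_pressure : (List (String × Int)) :=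
  [("north", 3), ("east", 9), ("south", 21), ("west", 15)]

def Spec_analyze_traffic_pressure (lane_vehicles : List (String × Int)) (out : List (String × String)) : Prop := out = analyze_traffic_pressure_alt lane_vehicles
instance (lane_vehicles : List (String × Int)) (out : List (String × String)) : Decidable (Spec_analyze_traffic_pressure lane_vehicles out) := by unfold Spec_analyze_traffic_pressure; infer_instance

-- ===== CLAIM (what is proved, stated in full; the proofs are below) =====
def Claim_equal_analyze_traffic_pressure : Prop := ∀ (lane_vehicles : List (String × Int)), Dom_analyze_traffic_pressure lane_vehicles → Pre_analyze_traffic_pressure lane_vehicles → Spec_analyze_traffic_pressure lane_vehicles (analyze_traffic_pressure lane_vehicles)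

-- ===== LEMMAS AND PROOFS =====

-- A's fold: fresh distinct keys, so the result is the classification map
theorem pv_a_items (lane_vehicles : List (String × Int))
    (h : (lane_vehicles.map (·.1)).Nodup) :
    analyze_traffic_pressure lane_vehicles
    = lane_vehicles.map (fun p => (p.1,
        if p.2 ≥ 20 then "CRITICAL"
        else if p.2 ≥ 15 then "HIGH"
        else if p.2 ≥ 8 then "MODERATE"
        else if p.2 ≥ 4 then "LOW"
        else "MINIMAL")) := by
  show (lane_vehicles.foldl (fun d p =>
      if p.2 ≥ 20 then d.insert p.1 "CRITICAL"
      else if p.2 ≥ 15 then d.insert p.1 "HIGH"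
      else if p.2 ≥ 8 then d.insert p.1 "MODERATE"
      else if p.2 ≥ 4 then d.insert p.1 "LOW"
      else d.insert p.1 "MINIMAL") PySem.Dict.empty).items = _
  rw [show (fun (d : PySem.Dict String String) (p : String × Int) =>
      if p.2 ≥ 20 then d.insert p.1 "CRITICAL"
      else if p.2 ≥ 15 then d.insert p.1 "HIGH"
      else if p.2 ≥ 8 then d.insert p.1 "MODERATE"
      else if p.2 ≥ 4 then d.insert p.1 "LOW"
      else d.insert p.1 "MINIMAL")
      = (fun d p => d.insert p.1
          (if p.2 ≥ 20 then "CRITICAL"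
           else if p.2 ≥ 15 then "HIGH"
           else if p.2 ≥ 8 then "MODERATE"
           else if p.2 ≥ 4 then "LOW"
           else "MINIMAL")) from by
    funext d p; split_ifs <;> rfl]
  rw [PySem.Dict.items_foldl_insert_fresh lane_vehicles (fun p => p.1)
      (fun p => if p.2 ≥ 20 then "CRITICAL"
        else if p.2 ≥ 15 then "HIGH"
        else if p.2 ≥ 8 then "MODERATE"
        else if p.2 ≥ 4 then "LOW"
        else "MINIMAL") PySem.Dict.empty
      (fun a _ => PySem.Dict.contains_empty _) h]
  simp [PySem.Dict.empty]

-- one upgrade pass of B over l, on a dict already holding pre ++ l's current values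
theorem pv_pass (t : Int) (lab : String) (g : String × Int → String) :
    ∀ (l : List (String × Int)) (pre : List (String × String)),
    (pre.map (·.1) ++ l.map (·.1)).Nodup →
    l.foldl (fun d p => if p.2 ≥ t then d.insert p.1 lab else d)
      (PySem.Dict.mk (pre ++ l.map (fun p => (p.1, g p))))
    = PySem.Dict.mk (pre ++ l.map (fun p => (p.1, if p.2 ≥ t then lab else g p))) := by
  intro l
  induction l with
  | nil => intro pre _; simp
  | cons p rest ih =>
    intro pre hnd
    have hsplit := List.nodup_append.mp hnd
    have hp_pre : ∀ q ∈ pre, q.1 ≠ p.1 := by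
      intro q hq hEq
      exact hsplit.2.2 q.1 (List.mem_map_of_mem (f := fun x => x.1) hq) p.1 (by simp) hEq
    have hp_rest : ∀ q ∈ rest, q.1 ≠ p.1 := by
      intro q hq hEq
      have h1 : ((p :: rest).map (·.1)).Nodup := hsplit.2.1
      simp only [List.map_cons, List.nodup_cons] at h1
      exact h1.1 (hEq ▸ List.mem_map_of_mem hq)
    simp only [List.foldl_cons, List.map_cons]
    by_cases ht : p.2 ≥ t
    · rw [if_pos ht]
      have hcont : (PySem.Dict.mk (pre ++ (p.1, g p) :: rest.map (fun p => (p.1, g p)))).contains p.1 = true := by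
        rw [PySem.Dict.contains_eq_decide_mem_keys]
        simp [PySem.Dict.keys]
      have hins : (PySem.Dict.mk (pre ++ (p.1, g p) :: rest.map (fun p => (p.1, g p)))).insert p.1 lab
          = PySem.Dict.mk ((pre ++ [(p.1, lab)]) ++ rest.map (fun p => (p.1, g p))) := by
        apply PySem.Dict.ext
        rw [PySem.Dict.items_insert_of_contains _ lab hcont]
        show (pre ++ (p.1, g p) :: rest.map (fun p => (p.1, g p))).map
            (fun q => if q.1 == p.1 then (p.1, lab) else q) = _
        rw [List.map_append, List.map_cons]
        have e1 : pre.map (fun q => if q.1 == p.1 then (p.1, lab) else q) = pre := by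
          rw [List.map_congr_left (g := id) (fun q hq => by simp [hp_pre q hq])]
          exact List.map_id pre
        have e2 : (rest.map (fun p => (p.1, g p))).map (fun q => if q.1 == p.1 then (p.1, lab) else q)
            = rest.map (fun p => (p.1, g p)) := by
          rw [List.map_congr_left (g := id) (fun q hq => by
            rcases List.mem_map.mp hq with ⟨r, hr, rfl⟩
            simp [hp_rest r hr])]
          exact List.map_id _
        rw [e1, e2]
        simp
      rw [hins, ih (pre ++ [(p.1, lab)]) (by
        simp only [List.map_append, List.map_cons] at hnd ⊢
        simpa [List.append_assoc] using hnd)]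
      simp [if_pos ht]
    · rw [if_neg ht]
      rw [show PySem.Dict.mk (pre ++ (p.1, g p) :: rest.map (fun p => (p.1, g p)))
          = PySem.Dict.mk ((pre ++ [(p.1, g p)]) ++ rest.map (fun p => (p.1, g p))) from by simp]
      rw [ih (pre ++ [(p.1, g p)]) (by
        simp only [List.map_append, List.map_cons] at hnd ⊢
        simpa [List.append_assoc] using hnd)]
      simp [if_neg ht]

-- the initial MINIMAL pass of B
theorem pv_b_init (lane_vehicles : List (String × Int))
    (h : (lane_vehicles.map (·.1)).Nodup) :
    lane_vehicles.foldl (fun d p => d.insert p.1 "MINIMAL") PySem.Dict.empty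
    = PySem.Dict.mk (lane_vehicles.map (fun p => (p.1, "MINIMAL"))) := by
  apply PySem.Dict.ext
  rw [PySem.Dict.items_foldl_insert_fresh lane_vehicles (fun p => p.1)
      (fun _ => "MINIMAL") PySem.Dict.empty
      (fun a _ => PySem.Dict.contains_empty _) h]
  simp [PySem.Dict.empty]

-- ===== VERDICT (by name: the statement is the Claim_ definition above) =====
theorem analyze_traffic_pressure_spec : Claim_equal_analyze_traffic_pressure := by
  intro lv _ hpre
  have hnd : (lv.map (·.1)).Nodup := hpre
  show analyze_traffic_pressure lv = analyze_traffic_pressure_alt lv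
  rw [pv_a_items lv hnd]
  show _ = (pvStages.foldl (fun d tl =>
      lv.foldl (fun d p => if p.2 ≥ tl.1 then d.insert p.1 tl.2 else d) d)
      (lv.foldl (fun d p => d.insert p.1 "MINIMAL") PySem.Dict.empty)).items
  rw [pv_b_init lv hnd]
  simp only [pvStages, List.foldl_cons, List.foldl_nil]
  have hnd' : (([] : List (String × String)).map (·.1) ++ lv.map (·.1)).Nodup := by simpa using hnd
  have h4 := pv_pass 4 "LOW" (fun _ => "MINIMAL") lv [] hnd'
  simp only [List.nil_append] at h4
  rw [h4]
  have h8 := pv_pass 8 "MODERATE" (fun p => if p.2 ≥ 4 then "LOW" else "MINIMAL") lv [] hnd'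
  simp only [List.nil_append] at h8
  rw [h8]
  have h15 := pv_pass 15 "HIGH"
    (fun p => if p.2 ≥ 8 then "MODERATE" else if p.2 ≥ 4 then "LOW" else "MINIMAL") lv [] hnd'
  simp only [List.nil_append] at h15
  rw [h15]
  have h20 := pv_pass 20 "CRITICAL"
    (fun p => if p.2 ≥ 15 then "HIGH" else if p.2 ≥ 8 then "MODERATE"
      else if p.2 ≥ 4 then "LOW" else "MINIMAL") lv [] hnd'
  simp only [List.nil_append] at h20
  rw [h20]
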